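-- pv_equiv track=rewrite | github.com/jackwharrison/krcs-bitrix | scripts/Eligibility_Check.py | get_matching_beneficiaries
-- ===== SOURCE A (Python) =====
-- def get_matching_beneficiaries(project, beneficiaries, matching_fields, field_labels):
--     matches = []
--
--     for ben in beneficiaries:
--         match = True
--         for field_map in matching_fields:
--             ben_field = field_map["beneficiary_field"]
--             proj_field = field_map["project_field"]
--
--             ben_val = str(ben.get(ben_field, ""))
--             proj_val = str(project.get(proj_field, ""))
--
--             ben_label = field_labels.get(ben_field, {}).get(ben_val, "").strip().lower()
--             proj_label = field_labels.get(proj_field, {}).get(proj_val, "").strip().lower()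
--
--             if proj_label == "yes" and ben_label != "yes":
--                 match = False
--                 break
--
--         if match:
--             matches.append(ben)
--
--     return matches
-- ===== SOURCE B (Python) =====
-- def get_matching_beneficiaries(project, beneficiaries, matching_fields, field_labels):
--     def label(field, value):
--         return field_labels.get(field, {}).get(str(value), "").strip().lower()
--
--     required = [fm["beneficiary_field"] for fm in matching_fields
--                 if label(fm["project_field"], project.get(fm["project_field"], "")) == "yes"]
--
--     return [ben for ben in beneficiaries
--             if all(label(bf, ben.get(bf, "")) == "yes" for bf in required)]
-- ===== Notes on version B (the rewrite author's own statement) =====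
-- stated objective: alternative
-- what changed: B splits the work into two phases: one pass over matching_fields builds the list of beneficiary fields whose project label is 'yes', then each beneficiary is filtered by checking only those required fields, instead of recomputing the project-side labels inside every beneficiary's loop.
-- outside the precondition, e.g. on get_matching_beneficiaries({}, [], [{}], {}): A returns [], B raises KeyError
import Mathlib
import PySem

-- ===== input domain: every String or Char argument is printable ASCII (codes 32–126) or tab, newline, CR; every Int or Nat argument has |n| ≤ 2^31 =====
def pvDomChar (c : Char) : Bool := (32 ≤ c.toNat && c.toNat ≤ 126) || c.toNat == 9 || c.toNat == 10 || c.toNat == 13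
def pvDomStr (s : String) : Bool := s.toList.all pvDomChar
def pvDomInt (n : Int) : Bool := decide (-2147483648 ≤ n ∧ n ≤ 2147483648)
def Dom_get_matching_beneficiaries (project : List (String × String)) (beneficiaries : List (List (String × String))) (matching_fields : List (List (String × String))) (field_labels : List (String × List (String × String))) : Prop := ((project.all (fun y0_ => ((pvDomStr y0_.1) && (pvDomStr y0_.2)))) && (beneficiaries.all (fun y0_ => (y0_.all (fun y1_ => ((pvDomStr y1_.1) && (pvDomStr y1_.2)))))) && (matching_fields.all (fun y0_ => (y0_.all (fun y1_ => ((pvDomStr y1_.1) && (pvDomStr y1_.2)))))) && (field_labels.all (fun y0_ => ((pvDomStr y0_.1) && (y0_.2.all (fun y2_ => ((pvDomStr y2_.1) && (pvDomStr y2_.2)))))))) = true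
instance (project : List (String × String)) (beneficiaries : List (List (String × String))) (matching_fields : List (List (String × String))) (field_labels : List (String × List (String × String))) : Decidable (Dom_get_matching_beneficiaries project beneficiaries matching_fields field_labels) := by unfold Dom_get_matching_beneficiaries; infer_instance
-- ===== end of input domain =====

-- B restructures A into two phases: one pass over matching_fields builds the list of required
-- beneficiary fields (those whose project-side label is "yes"), then beneficiaries are filtered
-- by checking only those required fields; same return value, alternative decomposition.

-- dict lookup on an association list: first match (Python dict semantics under the convention)
def pvAlGet? {ν : Type} (d : List (String × ν)) (k : String) : Option ν :=
  (d.find? (fun p => p.1 == k)).map (·.2)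
def pvAlGetD {ν : Type} (d : List (String × ν)) (k : String) (dflt : ν) : ν :=
  (pvAlGet? d k).getD dflt

-- ===== PORT A =====
-- inner 'for field_map in matching_fields' loop with break; 'none' = KeyError (excluded by Pre_)
def aLoop (project : List (String × String)) (field_labels : List (String × List (String × String)))
    (ben : List (String × String)) : List (List (String × String)) → Option Bool
  | [] => some true
  | fm :: rest =>
    match pvAlGet? fm "beneficiary_field", pvAlGet? fm "project_field" with
    | some ben_field, some proj_field =>
      let ben_val := pvAlGetD ben ben_field ""
      let proj_val := pvAlGetD project proj_field ""
      let ben_label := PySem.Str.lower (PySem.Str.strip (pvAlGetD (pvAlGetD field_labels ben_field []) ben_val ""))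
      let proj_label := PySem.Str.lower (PySem.Str.strip (pvAlGetD (pvAlGetD field_labels proj_field []) proj_val ""))
      if proj_label == "yes" && !(ben_label == "yes") then some false
      else aLoop project field_labels ben rest
    | _, _ => none

def get_matching_beneficiaries (project : List (String × String)) (beneficiaries : List (List (String × String))) (matching_fields : List (List (String × String))) (field_labels : List (String × List (String × String))) : List (List (String × String)) :=
  (beneficiaries.foldl (fun acc ben =>
      match acc, aLoop project field_labels ben matching_fields with
      | some ms, some true => some (ms ++ [ben])
      | some ms, some false => some ms
      | _, _ => none) (some [])).getD []

-- ===== PORT B =====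
-- label(field, value) helper of Source B
def bLabel (field_labels : List (String × List (String × String))) (field value : String) : String :=
  PySem.Str.lower (PySem.Str.strip (pvAlGetD (pvAlGetD field_labels field []) value ""))

-- phase 1 of Source B: the required-fields comprehension; 'none' = KeyError (excluded by Pre_)
def bRequired (project : List (String × String)) (field_labels : List (String × List (String × String))) :
    List (List (String × String)) → Option (List String)
  | [] => some []
  | fm :: rest =>
    match pvAlGet? fm "project_field" with
    | none => none
    | some pf =>
      if bLabel field_labels pf (pvAlGetD project pf "") == "yes" then
        match pvAlGet? fm "beneficiary_field" with
        | none => none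
        | some bf => (bRequired project field_labels rest).map (bf :: ·)
      else bRequired project field_labels rest

def get_matching_beneficiaries_alt (project : List (String × String)) (beneficiaries : List (List (String × String))) (matching_fields : List (List (String × String))) (field_labels : List (String × List (String × String))) : List (List (String × String)) :=
  match bRequired project field_labels matching_fields with
  | none => []
  | some required =>
    beneficiaries.filter (fun ben =>
      required.all (fun bf => bLabel field_labels bf (pvAlGetD ben bf "") == "yes"))

-- ===== PRECONDITION & SPEC =====
-- Pre_ excludes inputs where some matching_fields entry lacks the "beneficiary_field" or
-- "project_field" key: there Python A raises KeyError (except when the beneficiary loop is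
-- empty or breaks before reaching the bad entry, an accident of the loop shape) and Python B
-- itself raises KeyError while building the required list.
def Pre_get_matching_beneficiaries (project : List (String × String)) (beneficiaries : List (List (String × String))) (matching_fields : List (List (String × String))) (field_labels : List (String × List (String × String))) : Prop :=
  ∀ fm ∈ matching_fields,
    (pvAlGet? fm "beneficiary_field").isSome = true ∧ (pvAlGet? fm "project_field").isSome = true
instance (project : List (String × String)) (beneficiaries : List (List (String × String))) (matching_fields : List (List (String × String))) (field_labels : List (String × List (String × String))) : Decidable (Pre_get_matching_beneficiaries project beneficiaries matching_fields field_labels) := by unfold Pre_get_matching_beneficiaries; infer_instance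

def pvWitness_get_matching_beneficiaries : (List (String × String)) × (List (List (String × String))) × (List (List (String × String))) × (List (String × List (String × String))) :=
  ([("a", "1")], [[("a", "1")], [("a", "2")]],
   [[("beneficiary_field", "a"), ("project_field", "a")]],
   [("a", [("1", "yes"), ("2", "no")])])

def Spec_get_matching_beneficiaries (project : List (String × String)) (beneficiaries : List (List (String × String))) (matching_fields : List (List (String × String))) (field_labels : List (String × List (String × String))) (out : List (List (String × String))) : Prop := out = get_matching_beneficiaries_alt project beneficiaries matching_fields field_labels
instance (project : List (String × String)) (beneficiaries : List (List (String × String))) (matching_fields : List (List (String × String))) (field_labels : List (String × List (String × String))) (out : List (List (String × String))) : Decidable (Spec_get_matching_beneficiaries project beneficiaries matching_fields field_labels out) := by unfold Spec_get_matching_beneficiaries; infer_instance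

-- ===== CLAIM (what is proved, stated in full; the proofs are below) =====
def Claim_equal_get_matching_beneficiaries : Prop := ∀ (project : List (String × String)) (beneficiaries : List (List (String × String))) (matching_fields : List (List (String × String))) (field_labels : List (String × List (String × String))), Dom_get_matching_beneficiaries project beneficiaries matching_fields field_labels → Pre_get_matching_beneficiaries project beneficiaries matching_fields field_labels → Spec_get_matching_beneficiaries project beneficiaries matching_fields field_labels (get_matching_beneficiaries project beneficiaries matching_fields field_labels)

-- ===== LEMMAS AND PROOFS =====

-- Under Pre_, phase 1 of B succeeds, and A's inner loop on any beneficiary computes exactly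
-- "all required fields of that beneficiary have label yes".
lemma aLoop_eq_required (project : List (String × String)) (field_labels : List (String × List (String × String)))
    (mfs : List (List (String × String)))
    (h : ∀ fm ∈ mfs, (pvAlGet? fm "beneficiary_field").isSome = true ∧ (pvAlGet? fm "project_field").isSome = true) :
    ∃ req, bRequired project field_labels mfs = some req ∧
      ∀ ben, aLoop project field_labels ben mfs
        = some (req.all (fun bf => bLabel field_labels bf (pvAlGetD ben bf "") == "yes")) := by
  induction mfs with
  | nil => exact ⟨[], rfl, fun ben => rfl⟩
  | cons fm rest ih =>
    obtain ⟨h1, h2⟩ := h fm (List.mem_cons_self ..)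
    obtain ⟨bf0, hbf⟩ := Option.isSome_iff_exists.mp h1
    obtain ⟨pf0, hpf⟩ := Option.isSome_iff_exists.mp h2
    obtain ⟨req, hreq, hloop⟩ := ih (fun fm' hm => h fm' (List.mem_cons_of_mem _ hm))
    by_cases hyes : bLabel field_labels pf0 (pvAlGetD project pf0 "") == "yes"
    · refine ⟨bf0 :: req, ?_, ?_⟩
      · simp [bRequired, hbf, hpf, hyes, hreq]
      · intro ben
        by_cases hb : bLabel field_labels bf0 (pvAlGetD ben bf0 "") == "yes"
        · simp [aLoop, hbf, hpf, bLabel] at *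
          simp [hyes, hb, hloop ben]
        · simp [aLoop, hbf, hpf, bLabel] at *
          simp [hyes, hb]
    · refine ⟨req, ?_, ?_⟩
      · simp [bRequired, hpf, hyes, hreq]
      · intro ben
        simp [aLoop, hbf, hpf, bLabel] at *
        simp [hyes, hloop ben]

-- A's outer accumulator loop is a filter when the inner loop is a predicate.
lemma foldl_eq_filter (p : List (String × String) → Bool)
    (g : List (String × String) → Option Bool)
    (hg : ∀ ben, g ben = some (p ben)) :
    ∀ (bens : List (List (String × String))) (ms : List (List (String × String))),
      (bens.foldl (fun acc ben =>
        match acc, g ben with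
        | some ms, some true => some (ms ++ [ben])
        | some ms, some false => some ms
        | _, _ => none) (some ms))
      = some (ms ++ bens.filter p) := by
  intro bens
  induction bens with
  | nil => intro ms; simp
  | cons b rest ih =>
    intro ms
    by_cases hb : p b
    · simp [List.foldl_cons, hg b, hb, ih]
    · simp [List.foldl_cons, hg b, hb, ih]

-- ===== VERDICT (by name: the statement is the Claim_ definition above) =====
theorem get_matching_beneficiaries_spec : Claim_equal_get_matching_beneficiaries := by
  intro project beneficiaries matching_fields field_labels _hdom hpre
  obtain ⟨req, hreq, hloop⟩ := aLoop_eq_required project field_labels matching_fields hpre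
  unfold Spec_get_matching_beneficiaries get_matching_beneficiaries get_matching_beneficiaries_alt
  rw [hreq,
    foldl_eq_filter (fun ben => req.all (fun bf => bLabel field_labels bf (pvAlGetD ben bf "") == "yes"))
      (fun ben => aLoop project field_labels ben matching_fields) hloop beneficiaries []]
  simp
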